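-- pv_equiv track=rewrite | github.com/ai-dynamo/dynamo | components/src/dynamo/vllm/multimodal_utils/hash_utils.py | find_image_token_ranges
-- ===== SOURCE A (Python) =====
-- def find_image_token_ranges(
--     tokens: list[int], image_token_id: int
-- ) -> list[tuple[int, int]]:
--     """Find contiguous runs of image_token_id in a token sequence."""
--     ranges = []
--     start = None
--     for i, t in enumerate(tokens):
--         if t == image_token_id:
--             if start is None:
--                 start = i
--         elif start is not None:
--             ranges.append((start, i))
--             start = None
--     if start is not None:
--         ranges.append((start, len(tokens)))
--     return ranges
-- ===== SOURCE B (Python) =====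
-- from itertools import groupby
--
--
-- def find_image_token_ranges(
--     tokens: list[int], image_token_id: int
-- ) -> list[tuple[int, int]]:
--     """Find contiguous runs of image_token_id in a token sequence."""
--     ranges = []
--     offset = 0
--     for key, group in groupby(tokens):
--         n = sum(1 for _ in group)
--         if key == image_token_id:
--             ranges.append((offset, offset + n))
--         offset += n
--     return ranges
-- ===== Notes on version B (the rewrite author's own statement) =====
-- stated objective: idiomatic
-- what changed: Replaces the per-element None-sentinel state machine with itertools.groupby: walk consecutive equal-token groups, emit (offset, offset+len) for groups equal to image_token_id.
import Mathlib
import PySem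

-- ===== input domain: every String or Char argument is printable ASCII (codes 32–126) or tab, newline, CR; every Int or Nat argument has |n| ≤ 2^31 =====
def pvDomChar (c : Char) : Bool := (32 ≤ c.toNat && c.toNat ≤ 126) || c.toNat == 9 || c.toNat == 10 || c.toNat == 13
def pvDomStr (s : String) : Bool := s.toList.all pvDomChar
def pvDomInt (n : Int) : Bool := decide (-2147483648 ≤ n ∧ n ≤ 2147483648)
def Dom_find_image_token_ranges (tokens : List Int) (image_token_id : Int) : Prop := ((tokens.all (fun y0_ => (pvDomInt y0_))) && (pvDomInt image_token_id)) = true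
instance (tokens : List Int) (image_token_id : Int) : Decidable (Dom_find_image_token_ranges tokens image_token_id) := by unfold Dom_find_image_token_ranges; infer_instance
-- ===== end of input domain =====

-- B replaces A's per-element None-sentinel state machine with a groupby-style
-- traversal of maximal runs of equal tokens (idiomatic; same O(n) cost).

-- ===== PORT A =====
-- the loop body of A's for-loop, named so the proofs can refer to it
def aStep (image_token_id : Int) (st : List (Int × Int) × Option Int) (it : Int × Int) :
    List (Int × Int) × Option Int :=
  if it.2 == image_token_id then
    match st.2 with
    | none => (st.1, some it.1)
    | some _ => st
  else
    match st.2 with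
    | some s => (st.1 ++ [(s, it.1)], none)
    | none => st

def find_image_token_ranges (tokens : List Int) (image_token_id : Int) : List (Int × Int) :=
  let st := (PySem.List.enumerate tokens 0).foldl (aStep image_token_id) ([], none)
  match st.2 with
  | some s => st.1 ++ [(s, (tokens.length : Int))]
  | none => st.1

-- ===== PORT B =====
-- groupby: peel the maximal leading run of equal tokens, emit a range if it matches
def altGo (tokens : List Int) (image_token_id : Int) (offset : Int) : List (Int × Int) :=
  match tokens with
  | [] => []
  | t :: rest =>
    let n : Int := 1 + ((rest.takeWhile (· == t)).length : Int)
    (if t == image_token_id then [(offset, offset + n)] else []) ++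
      altGo (rest.dropWhile (· == t)) image_token_id (offset + n)
termination_by tokens.length
decreasing_by
  simp only [List.length_cons]
  exact Nat.lt_succ_of_le (List.length_dropWhile_le _ _)

def find_image_token_ranges_alt (tokens : List Int) (image_token_id : Int) : List (Int × Int) :=
  altGo tokens image_token_id 0

-- ===== PRECONDITION & SPEC =====
def Spec_find_image_token_ranges (tokens : List Int) (image_token_id : Int) (out : List (Int × Int)) : Prop := out = find_image_token_ranges_alt tokens image_token_id
instance (tokens : List Int) (image_token_id : Int) (out : List (Int × Int)) : Decidable (Spec_find_image_token_ranges tokens image_token_id out) := by unfold Spec_find_image_token_ranges; infer_instance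

-- ===== CLAIM (what is proved, stated in full; the proofs are below) =====
def Claim_equal_find_image_token_ranges : Prop := ∀ (tokens : List Int) (image_token_id : Int), Dom_find_image_token_ranges tokens image_token_id → Spec_find_image_token_ranges tokens image_token_id (find_image_token_ranges tokens image_token_id)

-- ===== LEMMAS AND PROOFS =====

-- closing A's loop state at end position n
def aFinish (st : List (Int × Int) × Option Int) (n : Int) : List (Int × Int) :=
  match st.2 with
  | some s => st.1 ++ [(s, n)]
  | none => st.1

-- altGo ignores how a non-matching run is split: consuming one non-matching head
theorem altGo_skip (id t : Int) (rest : List Int) (i : Int) (ht : t ≠ id) :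
    altGo (t :: rest) id i = altGo rest id (i + 1) := by
  cases rest with
  | nil => simp [altGo, ht]
  | cons u rest2 =>
    by_cases hu : u = t
    · subst hu
      rw [altGo, altGo]
      simp only [List.takeWhile, List.dropWhile, beq_self_eq_true, beq_iff_eq, ht,
        if_false, List.length_cons]
      simp only [List.nil_append]
      congr 1
      push_cast
      ring
    · rw [altGo]
      simp [List.takeWhile_cons_of_neg, List.dropWhile_cons_of_neg,
        (by simpa using hu : ¬ (u == t) = true), ht]

-- the combined loop invariant for A's fold, with a closed (P) and an open (O) run state
theorem fold_invariant (id : Int) :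
    ∀ n (l : List Int), l.length ≤ n →
      (∀ (i : Int) (ranges : List (Int × Int)),
        aFinish ((PySem.List.enumerate l i).foldl (aStep id) (ranges, none)) (i + l.length)
          = ranges ++ altGo l id i) ∧
      (∀ (i s : Int) (ranges : List (Int × Int)),
        aFinish ((PySem.List.enumerate l i).foldl (aStep id) (ranges, some s)) (i + l.length)
          = ranges ++ [(s, i + ((l.takeWhile (· == id)).length : Int))]
              ++ altGo (l.dropWhile (· == id)) id (i + ((l.takeWhile (· == id)).length : Int))) := by
  intro n
  induction n with
  | zero =>
    intro l hl
    have : l = [] := List.length_eq_zero_iff.mp (Nat.le_zero.mp hl)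
    subst this
    constructor
    · intro i ranges; simp [PySem.List.enumerate, aFinish, altGo]
    · intro i s ranges; simp [PySem.List.enumerate, aFinish, altGo]
  | succ m ih =>
    intro l hl
    cases l with
    | nil =>
      constructor
      · intro i ranges; simp [PySem.List.enumerate, aFinish, altGo]
      · intro i s ranges; simp [PySem.List.enumerate, aFinish, altGo]
    | cons t rest =>
      have hrest : rest.length ≤ m := Nat.lt_succ_iff.mp (by simpa using hl)
      obtain ⟨ihP, ihO⟩ := ih rest hrest
      constructor
      · -- closed state
        intro i ranges
        rw [PySem.List.enumerate_cons]
        by_cases ht : t = id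
        · subst ht
          simp only [List.foldl_cons, aStep, beq_self_eq_true, if_true]
          have := ihO (i + 1) i ranges
          simp only [List.length_cons] at *
          push_cast at this ⊢
          rw [show i + ((rest.length : Int) + 1) = (i + 1) + (rest.length : Int) by ring, this]
          rw [altGo]
          simp only [beq_self_eq_true, if_true]
          rw [List.append_assoc]
          congr 2
          · congr 2 <;> ring
          · congr 1; ring
        · simp only [List.foldl_cons, aStep, beq_iff_eq, ht, if_false]
          have := ihP (i + 1) ranges
          simp only [List.length_cons]
          push_cast at this ⊢
          rw [show i + ((rest.length : Int) + 1) = (i + 1) + (rest.length : Int) by ring, this,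
            altGo_skip id t rest i ht]
      · -- open state: a run starting at s is pending
        intro i s ranges
        rw [PySem.List.enumerate_cons]
        by_cases ht : t = id
        · subst ht
          simp only [List.foldl_cons, aStep, beq_self_eq_true, if_true]
          have := ihO (i + 1) s ranges
          rw [List.takeWhile_cons_of_pos (by simp), List.dropWhile_cons_of_pos (by simp)]
          simp only [List.length_cons]
          push_cast at this ⊢
          rw [show i + ((rest.length : Int) + 1) = i + 1 + (rest.length : Int) by ring,
            show i + (((rest.takeWhile (fun x => x == t)).length : Int) + 1)
              = i + 1 + ((rest.takeWhile (fun x => x == t)).length : Int) by ring]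
          exact this
        · simp only [List.foldl_cons, aStep, beq_iff_eq, ht, if_false]
          have := ihP (i + 1) (ranges ++ [(s, i)])
          rw [List.takeWhile_cons_of_neg (by simp [ht]), List.dropWhile_cons_of_neg (by simp [ht])]
          simp only [List.length_cons, List.length_nil, Nat.cast_zero, add_zero]
          push_cast at this ⊢
          rw [show i + ((rest.length : Int) + 1) = i + 1 + (rest.length : Int) by ring, this,
            altGo_skip id t rest i ht]

-- ===== VERDICT (by name: the statement is the Claim_ definition above) =====
theorem find_image_token_ranges_spec : Claim_equal_find_image_token_ranges := by
  intro tokens id _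
  unfold Spec_find_image_token_ranges find_image_token_ranges find_image_token_ranges_alt
  have := (fold_invariant id tokens.length tokens le_rfl).1 0 []
  simp only [zero_add] at this
  rw [show (match ((PySem.List.enumerate tokens 0).foldl (aStep id) ([], none)).2 with
      | some s => ((PySem.List.enumerate tokens 0).foldl (aStep id) ([], none)).1 ++ [(s, (tokens.length : Int))]
      | none => ((PySem.List.enumerate tokens 0).foldl (aStep id) ([], none)).1)
      = aFinish ((PySem.List.enumerate tokens 0).foldl (aStep id) ([], none)) (tokens.length : Int) from rfl]
  rw [this]
  simp
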